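-- pv_equiv track=rewrite | github.com/alexandroscharangionis/CS50_Python | problemset_2/vanity_plates/plates.py | check_last_chars
-- ===== SOURCE A (Python) =====
-- def check_last_chars(s):
--   for i in range(len(s)):
--     if s[i].isdigit():
--       if not s[i:].isdigit():
--         return False
--       else:
--         return True
--     else:
--       continue
-- ===== SOURCE B (Python) =====
-- def check_last_chars(s):
--   seen_digit = False
--   for c in s:
--     if c.isdigit():
--       seen_digit = True
--     elif seen_digit:
--       return False
--   if seen_digit:
--     return True
-- ===== Notes on version B (the rewrite author's own statement) =====
-- stated objective: simpler
-- what changed: Replaces the find-first-digit-then-slice-and-isdigit-the-suffix scan with a single stateful pass keeping a seen_digit flag, no indexing or slicing.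
import Mathlib
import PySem

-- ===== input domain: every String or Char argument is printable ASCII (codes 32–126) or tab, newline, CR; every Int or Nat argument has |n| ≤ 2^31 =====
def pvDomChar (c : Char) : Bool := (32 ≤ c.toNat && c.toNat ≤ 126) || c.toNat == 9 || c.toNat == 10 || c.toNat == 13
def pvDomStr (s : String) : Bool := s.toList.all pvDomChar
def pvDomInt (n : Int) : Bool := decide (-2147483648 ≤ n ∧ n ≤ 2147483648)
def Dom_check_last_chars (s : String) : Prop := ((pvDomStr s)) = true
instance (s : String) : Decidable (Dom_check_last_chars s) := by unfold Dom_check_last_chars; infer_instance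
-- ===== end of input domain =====

-- B replaces A's find-first-digit-then-test-the-suffix-slice scan with a single
-- stateful pass keeping a seen_digit flag (objective: simpler).

-- ===== PORT A =====
-- for i in range(len(s)): if s[i].isdigit(): return s[i:].isdigit(); falling off returns None
def pvALoop (cs : List Char) (i : Nat) : Option Bool :=
  if h : i < cs.length then
    if PySem.Chars.isdigit cs[i] then
      if !(PySem.Chars.strIsdigit (PySem.List.slice cs (some (i : Int)) none)) then
        some false
      else
        some true
    else
      pvALoop cs (i + 1)
  else
    none
termination_by cs.length - i

def check_last_chars (s : String) : Option Bool := pvALoop s.toList 0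

-- ===== PORT B =====
-- seen_digit flag scan; implicit None after the loop when no digit was seen
def pvBLoop : List Char → Bool → Option Bool
  | [], seen => if seen then some true else none
  | c :: rest, seen =>
    if PySem.Chars.isdigit c then pvBLoop rest true
    else if seen then some false
    else pvBLoop rest seen

def check_last_chars_alt (s : String) : Option Bool := pvBLoop s.toList false

-- ===== PRECONDITION & SPEC =====
def Spec_check_last_chars (s : String) (out : Option Bool) : Prop := out = check_last_chars_alt s
instance (s : String) (out : Option Bool) : Decidable (Spec_check_last_chars s out) := by unfold Spec_check_last_chars; infer_instance

-- ===== CLAIM (what is proved, stated in full; the proofs are below) =====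
def Claim_equal_check_last_chars : Prop := ∀ (s : String), Dom_check_last_chars s → Spec_check_last_chars s (check_last_chars s)

-- ===== LEMMAS AND PROOFS =====
lemma pvBLoop_true (cs : List Char) : pvBLoop cs true = some (cs.all PySem.Chars.isdigit) := by
  induction cs with
  | nil => simp [pvBLoop]
  | cons c rest ih =>
    by_cases h : PySem.Chars.isdigit c <;> simp [pvBLoop, h, ih]

lemma pvALoop_eq (cs : List Char) (i : Nat) : pvALoop cs i = pvBLoop (cs.drop i) false := by
  by_cases h : i < cs.length
  · rw [pvALoop]
    have hdrop : cs.drop i = cs[i] :: cs.drop (i + 1) := List.drop_eq_getElem_cons h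
    by_cases hd : PySem.Chars.isdigit cs[i]
    · have hslice : PySem.List.slice cs (some (i : Int)) none = cs.drop i :=
        PySem.List.slice_from_natCast cs i
      have hstr : PySem.Chars.strIsdigit (cs.drop i)
          = (cs.drop (i + 1)).all PySem.Chars.isdigit := by
        simp only [hdrop, PySem.Chars.strIsdigit, List.isEmpty_cons, List.all_cons, hd,
            Bool.not_false, Bool.true_and]
      rw [dif_pos h, if_pos hd, hslice, hstr, hdrop]
      simp only [pvBLoop, if_pos hd, pvBLoop_true]
      by_cases hall : (cs.drop (i + 1)).all PySem.Chars.isdigit <;> simp [hall]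
    · rw [hdrop]
      have ih := pvALoop_eq cs (i + 1)
      simp [h, hd, ih, pvBLoop]
  · rw [pvALoop]
    have : cs.drop i = [] := List.drop_eq_nil_of_le (by omega)
    simp [h, this, pvBLoop]
termination_by cs.length - i

-- ===== VERDICT (by name: the statement is the Claim_ definition above) =====
theorem check_last_chars_spec : Claim_equal_check_last_chars := by
  intro s _
  unfold Spec_check_last_chars check_last_chars check_last_chars_alt
  simpa using pvALoop_eq s.toList 0
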